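-- pv_equiv track=rewrite | github.com/diapod/orbidocs | scripts/build-site-docs.py | rewrite_asset_links
-- ===== SOURCE A (Python) =====
-- def rewrite_asset_links(text: str) -> str:
--     replacements = {
--         'src="styles/': 'src="/styles/',
--         "src='styles/": "src='/styles/",
--         'href="styles/': 'href="/styles/',
--         "href='styles/": "href='/styles/",
--         '](styles/': '](/styles/',
--     }
--     for old, new in replacements.items():
--         text = text.replace(old, new)
--     return text
-- ===== SOURCE B (Python) =====
-- def rewrite_asset_links(text: str) -> str:
--     # single left-to-right pass: at each position try the five prefix patterns,
--     # emit the replacement and skip the match, else copy the character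
--     pats = (
--         ('src="styles/', 'src="/styles/'),
--         ("src='styles/", "src='/styles/"),
--         ('href="styles/', 'href="/styles/'),
--         ("href='styles/", "href='/styles/"),
--         ('](styles/', '](/styles/'),
--     )
--     out = []
--     i = 0
--     n = len(text)
--     while i < n:
--         for old, new in pats:
--             if text.startswith(old, i):
--                 out.append(new)
--                 i += len(old)
--                 break
--         else:
--             out.append(text[i])
--             i += 1
--     return ''.join(out)
-- ===== Notes on version B (the rewrite author's own statement) =====
-- stated objective: alternative
-- what changed: A makes five sequential full-text str.replace passes (one per prefix pattern); B makes a single left-to-right scan that tries the five patterns at each position, emitting the replacement and skipping the match, so the text is traversed once.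
import Mathlib
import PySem

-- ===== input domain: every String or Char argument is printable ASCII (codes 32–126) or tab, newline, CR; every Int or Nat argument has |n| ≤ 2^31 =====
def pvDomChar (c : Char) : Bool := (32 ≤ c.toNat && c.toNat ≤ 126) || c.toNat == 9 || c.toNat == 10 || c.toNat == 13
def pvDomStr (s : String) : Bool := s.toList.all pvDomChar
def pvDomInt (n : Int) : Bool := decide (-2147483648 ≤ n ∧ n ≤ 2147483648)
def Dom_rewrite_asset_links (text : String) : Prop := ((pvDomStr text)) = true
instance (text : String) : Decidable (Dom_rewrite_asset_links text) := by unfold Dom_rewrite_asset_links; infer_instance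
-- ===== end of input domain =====

-- B replaces A's five sequential str.replace sweeps by ONE left-to-right scan that tries the
-- five prefix patterns at each position (alternative decomposition; not claimed faster).

-- ===== PORT A =====
-- A: five sequential str.replace passes, in the dict's insertion order.
def rewrite_asset_links (text : String) : String :=
  let t1 := PySem.Str.replace text "src=\"styles/" "src=\"/styles/"
  let t2 := PySem.Str.replace t1 "src='styles/" "src='/styles/"
  let t3 := PySem.Str.replace t2 "href=\"styles/" "href=\"/styles/"
  let t4 := PySem.Str.replace t3 "href='styles/" "href='/styles/"
  let t5 := PySem.Str.replace t4 "](styles/" "](/styles/"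
  t5

-- ===== PORT B =====
-- the five (old, new) pairs, in B's tuple order
def pvPats : List (List Char × List Char) :=
  [("src=\"styles/".toList, "src=\"/styles/".toList),
   ("src='styles/".toList, "src='/styles/".toList),
   ("href=\"styles/".toList, "href=\"/styles/".toList),
   ("href='styles/".toList, "href='/styles/".toList),
   ("](styles/".toList, "](/styles/".toList)]

-- B's while loop: at each position try the patterns in order (text.startswith(old, i));
-- on a match emit `new` and skip len(old) characters, otherwise copy one character.
def pvScan (S : List (List Char × List Char)) : List Char → List Char
  | [] => []
  | c :: t =>
    match S.find? (fun pr => pr.1.isPrefixOf (c :: t)) with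
    | some pr => pr.2 ++ pvScan S (t.drop (pr.1.length - 1))
    | none => c :: pvScan S t
termination_by l => l.length
decreasing_by all_goals simp

def rewrite_asset_links_alt (text : String) : String :=
  String.ofList (pvScan pvPats text.toList)

-- ===== PRECONDITION & SPEC =====
def Spec_rewrite_asset_links (text : String) (out : String) : Prop := out = rewrite_asset_links_alt text
instance (text : String) (out : String) : Decidable (Spec_rewrite_asset_links text out) := by unfold Spec_rewrite_asset_links; infer_instance

-- ===== CLAIM (what is proved, stated in full; the proofs are below) =====
def Claim_equal_rewrite_asset_links : Prop := ∀ (text : String), Dom_rewrite_asset_links text → Spec_rewrite_asset_links text (rewrite_asset_links text)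

-- ===== LEMMAS AND PROOFS =====

-- one str.replace pass, written as the same kind of scan (proof-only helper)
def pvRep (p q : List Char) : List Char → List Char
  | [] => []
  | c :: t =>
    if p.isPrefixOf (c :: t) then q ++ pvRep p q (t.drop (p.length - 1))
    else c :: pvRep p q t
termination_by l => l.length
decreasing_by all_goals simp

theorem pvGo_eq (p q : List Char) (hp : p ≠ []) :
    ∀ (fuel : Nat) (l acc : List Char), l.length ≤ fuel →
      PySem.Chars.replace.go p q fuel l acc = acc.reverse ++ pvRep p q l := by
  intro fuel
  induction fuel with
  | zero =>
    intro l acc h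
    have hl : l = [] := by cases l <;> simp_all
    subst hl
    simp [PySem.Chars.replace.go, pvRep]
  | succ n ih =>
    intro l acc h
    cases l with
    | nil => simp [PySem.Chars.replace.go, pvRep]
    | cons c t =>
      obtain ⟨k, hk⟩ : ∃ k, p.length = k + 1 := by
        cases p with
        | nil => exact absurd rfl hp
        | cons a b => exact ⟨b.length, rfl⟩
      simp only [PySem.Chars.replace.go]
      by_cases hpre : p.isPrefixOf (c :: t)
      · rw [if_pos hpre]
        have hdrop : List.drop p.length (c :: t) = t.drop (p.length - 1) := by
          rw [hk]; simp
        rw [hdrop, ih _ _ (by simp at h ⊢; omega)]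
        rw [pvRep]; rw [if_pos hpre]
        simp
      · rw [if_neg hpre, ih _ _ (by simp at h ⊢; omega)]
        rw [pvRep]; rw [if_neg hpre]
        simp

theorem pvReplace_eq (p q s : List Char) (hp : p ≠ []) :
    PySem.Chars.replace s p q = pvRep p q s := by
  unfold PySem.Chars.replace
  rw [if_neg (by simpa using hp)]
  rw [pvGo_eq p q hp s.length s [] le_rfl]
  simp

-- a prefix of w ++ u is a prefix of w or an extension of w
theorem pvPrefix_append_cases {p w u : List Char} (h : p <+: w ++ u) :
    p <+: w ∨ w <+: p := by
  rw [List.prefix_iff_eq_take] at h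
  rcases Nat.le_total p.length w.length with hle | hle
  · left
    rw [List.take_append_of_le_length hle] at h
    exact List.prefix_iff_eq_take.mpr h
  · right
    rw [List.prefix_iff_eq_take]
    have h2 : List.take w.length p = w := by
      calc List.take w.length p
          = List.take w.length (List.take p.length (w ++ u)) := by rw [← h]
        _ = List.take w.length (w ++ u) := by
              rw [List.take_take, Nat.min_eq_left hle]
        _ = w := by rw [List.take_append_of_le_length le_rfl, List.take_length]
    exact h2.symm

-- pvRep passes untouched over a block v none of whose nonempty suffixes is prefix-comparable with p
theorem pvRep_append (p q : List Char) :
    ∀ (v : List Char), (∀ w ∈ v.tails, w ≠ [] → ¬ p <+: w ∧ ¬ w <+: p) →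
      ∀ u, pvRep p q (v ++ u) = v ++ pvRep p q u := by
  intro v
  induction v with
  | nil => intro _ u; simp
  | cons a v' ih =>
    intro h u
    have hnp : ¬ p.isPrefixOf (a :: (v' ++ u)) = true := by
      intro hc
      rw [List.isPrefixOf_iff_prefix] at hc
      rw [show a :: (v' ++ u) = (a :: v') ++ u from rfl] at hc
      rcases pvPrefix_append_cases hc with h1 | h2
      · exact (h (a :: v') (by simp [List.mem_tails]) (by simp)).1 h1
      · exact (h (a :: v') (by simp [List.mem_tails]) (by simp)).2 h2
    rw [List.cons_append, pvRep, if_neg hnp]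
    rw [ih (fun w hw hne => h w (by
      rw [List.mem_tails] at hw ⊢
      exact hw.trans (List.suffix_cons a v')) hne) u]
    simp

-- the scan creates no new occurrence of any nonempty suffix of p
theorem pvScan_no_new (S : List (List Char × List Char)) (p : List Char)
    (he : ∀ w ∈ p.tails, w ≠ [] → ∀ pr ∈ S, ¬ w <+: pr.2 ∧ ¬ pr.2 <+: w) :
    ∀ (l w : List Char), w ∈ p.tails → w ≠ [] → ¬ w <+: l → ¬ w <+: pvScan S l := by
  intro l
  induction l using pvScan.induct S with
  | case1 => intro w _ hne hnl; rw [pvScan]; exact hnl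
  | case2 c t pr hfind ih =>
    intro w hw hne hnl hcon
    rw [pvScan, hfind] at hcon
    have hmem : pr ∈ S := List.mem_of_find?_eq_some hfind
    rcases pvPrefix_append_cases hcon with h1 | h2
    · exact (he w hw hne pr hmem).1 h1
    · exact (he w hw hne pr hmem).2 h2
  | case3 c t hfind ih =>
    intro w hw hne hnl hcon
    rw [pvScan, hfind] at hcon
    cases w with
    | nil => exact hne rfl
    | cons d w' =>
      rw [List.cons_prefix_cons] at hcon
      obtain ⟨hd, hw'⟩ := hcon
      subst hd
      cases w' with
      | nil => exact hnl (by simp)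
      | cons e w'' =>
        have hnl' : ¬ (e :: w'') <+: t := by
          intro hx
          exact hnl (by rw [List.cons_prefix_cons]; exact ⟨rfl, hx⟩)
        have hw2 : (e :: w'') ∈ p.tails := by
          rw [List.mem_tails] at hw ⊢
          exact (List.suffix_cons d (e :: w'')).trans hw
        exact ih (e :: w'') hw2 (by simp) hnl' hw'

-- when no pattern matches at positions < k, the scan copies the first k characters
theorem pvScan_copy (S : List (List Char × List Char)) :
    ∀ (k : Nat) (l : List Char), k ≤ l.length →
      (∀ j < k, S.find? (fun pr => pr.1.isPrefixOf (l.drop j)) = none) →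
      pvScan S l = l.take k ++ pvScan S (l.drop k) := by
  intro k
  induction k with
  | zero => intro l _ _; simp
  | succ n ih =>
    intro l hlen hno
    cases l with
    | nil => simp at hlen
    | cons c t =>
      have h0 : S.find? (fun pr => pr.1.isPrefixOf (c :: t)) = none := by
        have := hno 0 (Nat.succ_pos n); simpa using this
      rw [pvScan, h0]
      rw [ih t (by simp at hlen; omega) (fun j hj => by
        have := hno (j + 1) (by omega); simpa using this)]
      simp

-- the key step: composing one more replace pass onto a scan extends the pattern list
theorem pvStep (S : List (List Char × List Char)) (p q : List Char) (hp : p ≠ [])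
    (hc : ∀ pr ∈ S, ∀ w ∈ pr.2.tails, w ≠ [] → ¬ p <+: w ∧ ¬ w <+: p)
    (he : ∀ w ∈ p.tails, w ≠ [] → ∀ pr ∈ S, ¬ w <+: pr.2 ∧ ¬ pr.2 <+: w)
    (hd : ∀ w ∈ p.tails, w ≠ [] → w ≠ p → ∀ pr ∈ S, ¬ w <+: pr.1 ∧ ¬ pr.1 <+: w) :
    ∀ l, pvRep p q (pvScan S l) = pvScan (S ++ [(p, q)]) l := by
  suffices h : ∀ (n : Nat) (l : List Char), l.length ≤ n →
      pvRep p q (pvScan S l) = pvScan (S ++ [(p, q)]) l by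
    intro l; exact h l.length l le_rfl
  intro n
  induction n with
  | zero =>
    intro l hl
    have : l = [] := by cases l <;> simp_all
    subst this
    rw [pvScan, pvScan, pvRep]
  | succ n ih =>
    intro l hl
    obtain ⟨k, hk⟩ : ∃ k, p.length = k + 1 := by
      cases p with
      | nil => exact absurd rfl hp
      | cons a b => exact ⟨b.length, rfl⟩
    cases l with
    | nil => rw [pvScan, pvScan, pvRep]
    | cons c t =>
      cases hfind : S.find? (fun pr => pr.1.isPrefixOf (c :: t)) with
      | some pr =>
        have hmem : pr ∈ S := List.mem_of_find?_eq_some hfind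
        rw [pvScan, hfind]
        rw [pvRep_append p q pr.2 (fun w hw hne => hc pr hmem w hw hne) _]
        rw [ih (t.drop (pr.1.length - 1)) (by simp at hl ⊢; omega)]
        rw [pvScan, List.find?_append, hfind, Option.some_or]
      | none =>
        by_cases hpl : p <+: (c :: t)
        · -- p matches here: no S-pattern can overlap positions 0..|p|-1
          have hnoj : ∀ j < p.length,
              S.find? (fun pr => pr.1.isPrefixOf ((c :: t).drop j)) = none := by
            intro j hj
            rcases Nat.eq_zero_or_pos j with hj0 | hj1
            · subst hj0; simpa using hfind
            · rw [List.find?_eq_none]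
              intro pr hpr hcontra
              rw [List.isPrefixOf_iff_prefix] at hcontra
              obtain ⟨r, hr⟩ := hpl
              have hwp : p.drop j <+: (c :: t).drop j := by
                rw [← hr, List.drop_append_of_le_length (Nat.le_of_lt hj)]
                exact ⟨r, rfl⟩
              have hwtail : p.drop j ∈ p.tails := by
                rw [List.mem_tails]; exact List.drop_suffix j p
              have hwne : p.drop j ≠ [] := by
                intro hx
                have := congrArg List.length hx
                simp at this; omega
              have hwnep : p.drop j ≠ p := by
                intro hx
                have := congrArg List.length hx
                simp at this; omega
              rcases List.prefix_or_prefix_of_prefix hwp hcontra with h1 | h2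
              · exact (hd (p.drop j) hwtail hwne hwnep pr hpr).1 h1
              · exact (hd (p.drop j) hwtail hwne hwnep pr hpr).2 h2
          have hlen : p.length ≤ (c :: t).length := hpl.length_le
          rw [pvScan_copy S p.length (c :: t) hlen hnoj]
          have htake : (c :: t).take p.length = p := by
            rw [List.prefix_iff_eq_take] at hpl; exact hpl.symm
          rw [htake]
          -- pvRep consumes the leading p
          obtain ⟨d, p0, hp0⟩ : ∃ d p0, p = d :: p0 := by
            cases p with
            | nil => exact absurd rfl hp
            | cons a b => exact ⟨a, b, rfl⟩
          subst hp0
          have hstep : pvRep (d :: p0) q ((d :: p0) ++ pvScan S ((c :: t).drop (d :: p0).length))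
              = q ++ pvRep (d :: p0) q (pvScan S ((c :: t).drop (d :: p0).length)) := by
            conv_lhs => rw [List.cons_append, pvRep]
            rw [if_pos (by rw [← List.cons_append, List.isPrefixOf_iff_prefix]
                           exact ⟨_, rfl⟩)]
            simp
          rw [hstep]
          rw [ih ((c :: t).drop (d :: p0).length) (by simp at hl ⊢; omega)]
          -- the extended scan fires (p, q) here
          have hpq : List.find? (fun pr => pr.1.isPrefixOf (c :: t)) [(d :: p0, q)]
              = some (d :: p0, q) := by
            simp [List.find?, List.isPrefixOf_iff_prefix.mpr hpl]
          have hR : pvScan (S ++ [(d :: p0, q)]) (c :: t)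
              = q ++ pvScan (S ++ [(d :: p0, q)]) (t.drop ((d :: p0).length - 1)) := by
            rw [pvScan, List.find?_append, hfind, Option.none_or, hpq]
          rw [hR]
          have hdropt : t.drop ((d :: p0).length - 1) = (c :: t).drop (d :: p0).length := by
            simp
          rw [hdropt]
        · -- no match at all at this position
          rw [pvScan, hfind]
          have hnonew : ¬ p.isPrefixOf (c :: pvScan S t) = true := by
            rw [List.isPrefixOf_iff_prefix]
            have := pvScan_no_new S p he (c :: t) p (by rw [List.mem_tails]) hp hpl
            rw [pvScan, hfind] at this
            exact this
          rw [pvRep, if_neg hnonew]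
          rw [ih t (by simp at hl; omega)]
          have hpq : List.find? (fun pr => pr.1.isPrefixOf (c :: t)) [(p, q)] = none := by
            have : p.isPrefixOf (c :: t) = false := by
              rw [Bool.eq_false_iff]
              intro hx
              exact hpl (List.isPrefixOf_iff_prefix.mp hx)
            simp [List.find?, this]
          have hR : pvScan (S ++ [(p, q)]) (c :: t)
              = c :: pvScan (S ++ [(p, q)]) t := by
            rw [pvScan, List.find?_append, hfind, Option.none_or, hpq]
          rw [hR]

-- scanning with the empty pattern list is the identity
theorem pvScan_nil : ∀ l, pvScan [] l = l := by
  intro l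
  induction l with
  | nil => rw [pvScan]
  | cons c t ih => rw [pvScan]; simp [ih]

-- the five sequential passes equal the one-pattern-list scan
theorem pvChain (l : List Char) :
    pvRep "](styles/".toList "](/styles/".toList
      (pvRep "href='styles/".toList "href='/styles/".toList
        (pvRep "href=\"styles/".toList "href=\"/styles/".toList
          (pvRep "src='styles/".toList "src='/styles/".toList
            (pvRep "src=\"styles/".toList "src=\"/styles/".toList l))))
      = pvScan pvPats l := by
  have h1 := pvStep [] "src=\"styles/".toList "src=\"/styles/".toList (by decide) (by decide) (by decide) (by decide)
  have h2 := pvStep [("src=\"styles/".toList, "src=\"/styles/".toList)] "src='styles/".toList "src='/styles/".toList (by decide) (by decide) (by decide) (by decide)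
  have h3 := pvStep [("src=\"styles/".toList, "src=\"/styles/".toList), ("src='styles/".toList, "src='/styles/".toList)] "href=\"styles/".toList "href=\"/styles/".toList (by decide) (by decide) (by decide) (by decide)
  have h4 := pvStep [("src=\"styles/".toList, "src=\"/styles/".toList), ("src='styles/".toList, "src='/styles/".toList), ("href=\"styles/".toList, "href=\"/styles/".toList)] "href='styles/".toList "href='/styles/".toList (by decide) (by decide) (by decide) (by decide)
  have h5 := pvStep [("src=\"styles/".toList, "src=\"/styles/".toList), ("src='styles/".toList, "src='/styles/".toList), ("href=\"styles/".toList, "href=\"/styles/".toList), ("href='styles/".toList, "href='/styles/".toList)] "](styles/".toList "](/styles/".toList (by decide) (by decide) (by decide) (by decide)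
  simp only [List.cons_append, List.nil_append] at h1 h2 h3 h4 h5
  have e1 : pvRep "src=\"styles/".toList "src=\"/styles/".toList l
      = pvScan [("src=\"styles/".toList, "src=\"/styles/".toList)] l := by
    have := h1 l
    rwa [pvScan_nil] at this
  rw [e1, h2 l, h3 l, h4 l, h5 l]
  rfl

-- A unfolded to the five pvRep passes
theorem pvA_eq (text : String) :
    rewrite_asset_links text = String.ofList
      (pvRep "](styles/".toList "](/styles/".toList
        (pvRep "href='styles/".toList "href='/styles/".toList
          (pvRep "href=\"styles/".toList "href=\"/styles/".toList
            (pvRep "src='styles/".toList "src='/styles/".toList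
              (pvRep "src=\"styles/".toList "src=\"/styles/".toList text.toList))))) := by
  simp only [rewrite_asset_links, PySem.Str.replace, String.toList_ofList]
  rw [pvReplace_eq _ _ _ (by decide), pvReplace_eq _ _ _ (by decide),
      pvReplace_eq _ _ _ (by decide), pvReplace_eq _ _ _ (by decide),
      pvReplace_eq _ _ _ (by decide)]

-- ===== VERDICT (by name: the statement is the Claim_ definition above) =====
theorem rewrite_asset_links_spec : Claim_equal_rewrite_asset_links := by
  intro text _
  show rewrite_asset_links text = rewrite_asset_links_alt text
  rw [pvA_eq, rewrite_asset_links_alt, pvChain]
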